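-- pv_equiv track=rewrite | github.com/cgomez5609/machine-learning | unsupervised_learning/LatentDirichletAllocation/src/preprocess/data_processing.py | remove_numbers_and_punctuation_from_text
-- ===== SOURCE A (Python) =====
-- import string
--
-- def remove_numbers_and_punctuation_from_text(text_data):
--     new_text = list()
--     for i in range(len(text_data)):
--         temp = text_data[i]
--         for punc in string.punctuation:
--             if punc in temp:
--                 temp = temp.replace(punc, " ")
--         for digit in string.digits:
--             if digit in temp:
--                 temp = temp.replace(digit, "")
--         new_text.append(temp)
--     return new_text
-- ===== SOURCE B (Python) =====
-- def remove_numbers_and_punctuation_from_text(text_data):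
--     # One pass per string, classifying each char by its ASCII code (no char
--     # tables): digits (48-57) are dropped; printable non-space, non-letter,
--     # non-digit codes (33-126 minus letters) are exactly string.punctuation
--     # and become a space; everything else is kept.
--     out = []
--     for s in text_data:
--         buf = []
--         for c in s:
--             o = ord(c)
--             if 48 <= o <= 57:
--                 continue
--             if 33 <= o <= 126 and not (65 <= o <= 90 or 97 <= o <= 122):
--                 buf.append(" ")
--             else:
--                 buf.append(c)
--         out.append("".join(buf))
--     return out
-- ===== Notes on version B (the rewrite author's own statement) =====
-- stated objective: faster
-- what changed: Replaced the per-string sequence of ~42 whole-string replace/membership scans over character tables with a single left-to-right pass that classifies each character arithmetically by its ASCII code (digit range dropped, printable-non-alphanumeric range mapped to space, rest kept).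
import Mathlib
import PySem

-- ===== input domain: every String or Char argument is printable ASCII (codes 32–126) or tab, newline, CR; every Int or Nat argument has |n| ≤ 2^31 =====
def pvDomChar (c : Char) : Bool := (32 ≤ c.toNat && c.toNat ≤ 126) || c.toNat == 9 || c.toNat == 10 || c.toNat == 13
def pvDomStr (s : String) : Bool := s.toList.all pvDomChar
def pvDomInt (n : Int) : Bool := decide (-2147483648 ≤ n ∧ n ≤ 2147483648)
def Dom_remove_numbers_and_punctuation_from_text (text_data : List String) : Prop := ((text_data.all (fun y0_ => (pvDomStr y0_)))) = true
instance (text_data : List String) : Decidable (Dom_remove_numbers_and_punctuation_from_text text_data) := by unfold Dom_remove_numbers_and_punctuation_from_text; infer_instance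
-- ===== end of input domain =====

-- B replaces A's ~42 whole-string replace scans per string with one character pass that
-- classifies each character arithmetically by its ASCII code; equivalence proved on all inputs.

-- ===== PORT A =====
-- string.punctuation and string.digits, the char sequences A's inner for-loops iterate over
def pyPunctuation : List Char := ['!', '"', '#', '$', '%', '&', '\'', '(', ')', '*', '+', ',', '-', '.', '/', ':', ';', '<', '=', '>', '?', '@', '[', '\\', ']', '^', '_', '`', '{', '|', '}', '~']
def pyStrDigits : List Char := ['0', '1', '2', '3', '4', '5', '6', '7', '8', '9']

-- the body of A's outer loop: the two inner for-loops over temp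
def pyCleanA (temp0 : String) : String :=
  let temp := pyPunctuation.foldl
    (fun t punc =>
      if PySem.Str.isIn (String.ofList [punc]) t then
        PySem.Str.replace t (String.ofList [punc]) " "
      else t) temp0
  let temp := pyStrDigits.foldl
    (fun t digit =>
      if PySem.Str.isIn (String.ofList [digit]) t then
        PySem.Str.replace t (String.ofList [digit]) ""
      else t) temp
  temp

def remove_numbers_and_punctuation_from_text (text_data : List String) : List String :=
  (PySem.List.pyRange 0 (PySem.List.len text_data)).foldl
    (fun new_text i => new_text ++ [pyCleanA (PySem.List.pyGetD text_data i "")]) []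

-- ===== PORT B =====
-- classify one character by its ASCII code: digit -> dropped, printable
-- non-alphanumeric (= string.punctuation) -> space, anything else -> itself
def classifyB (c : Char) : List Char :=
  let o := c.toNat
  if 48 ≤ o ∧ o ≤ 57 then []
  else if 33 ≤ o ∧ o ≤ 126 ∧ ¬(65 ≤ o ∧ o ≤ 90) ∧ ¬(97 ≤ o ∧ o ≤ 122) then [' ']
  else [c]

-- the inner `for c in s` loop building buf
def cleanCharsB : List Char → List Char
  | [] => []
  | c :: cs => classifyB c ++ cleanCharsB cs

-- the outer `for s in text_data` loop
def remove_numbers_and_punctuation_from_text_alt : List String → List String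
  | [] => []
  | s :: rest => String.ofList (cleanCharsB s.toList) :: remove_numbers_and_punctuation_from_text_alt rest

-- ===== PRECONDITION & SPEC =====
def Spec_remove_numbers_and_punctuation_from_text (text_data : List String) (out : List String) : Prop := out = remove_numbers_and_punctuation_from_text_alt text_data
instance (text_data : List String) (out : List String) : Decidable (Spec_remove_numbers_and_punctuation_from_text text_data out) := by unfold Spec_remove_numbers_and_punctuation_from_text; infer_instance

-- ===== CLAIM (what is proved, stated in full; the proofs are below) =====
def Claim_equal_remove_numbers_and_punctuation_from_text : Prop := ∀ (text_data : List String), Dom_remove_numbers_and_punctuation_from_text text_data → Spec_remove_numbers_and_punctuation_from_text text_data (remove_numbers_and_punctuation_from_text text_data)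

-- ===== LEMMAS AND PROOFS =====

-- Single-char replace is a per-character flatMap.
theorem replace_go_singleton (p : Char) (new : List Char) :
    ∀ (cs acc : List Char) (fuel : Nat), cs.length ≤ fuel →
      PySem.Chars.replace.go [p] new fuel cs acc
        = acc.reverse ++ cs.flatMap (fun c => if c = p then new else [c]) := by
  intro cs
  induction cs with
  | nil =>
      intro acc fuel _
      cases fuel <;> simp [PySem.Chars.replace.go]
  | cons c t ih =>
      intro acc fuel hle
      cases fuel with
      | zero => simp at hle
      | succ fuel =>
          by_cases hc : c = p
          · subst hc
            have hpre : ([c].isPrefixOf (c :: t)) = true := by simp [List.isPrefixOf]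
            simp only [PySem.Chars.replace.go]
            rw [if_pos (by simp [hpre])]
            rw [show List.drop ([c].length) (c :: t) = t by simp]
            rw [ih (new.reverse ++ acc) fuel (by simpa using hle)]
            simp
          · have hne : ([p].isPrefixOf (c :: t)) = false := by
              simp [List.isPrefixOf]
              exact fun h => hc h.symm
            simp only [PySem.Chars.replace.go]
            rw [if_neg (by simp [hne])]
            rw [ih (c :: acc) fuel (by simpa using hle)]
            simp [hc]

theorem replace_singleton (cs : List Char) (p : Char) (new : List Char) :
    PySem.Chars.replace cs [p] new = cs.flatMap (fun c => if c = p then new else [c]) := by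
  simp [PySem.Chars.replace, replace_go_singleton p new cs [] cs.length le_rfl]

theorem flatMap_ite_single (l : List Char) (p x : Char) :
    l.flatMap (fun c => if c = p then [x] else [c]) = l.map (fun c => if c = p then x else c) := by
  induction l with
  | nil => simp
  | cons c cs ih => by_cases hc : c = p <;> simp [hc, ih]

theorem flatMap_ite_nil (l : List Char) (d : Char) :
    l.flatMap (fun c => if c = d then [] else [c]) = l.filter (fun c => c ≠ d) := by
  induction l with
  | nil => simp
  | cons c cs ih => by_cases hc : c = d <;> simp [hc, ih]

-- The guarded replace step over a string, pushed to lists: always the per-char map.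
theorem punct_step (t : String) (p : Char) :
    (if PySem.Str.isIn (String.ofList [p]) t then PySem.Str.replace t (String.ofList [p]) " " else t).toList
      = t.toList.map (fun c => if c = p then ' ' else c) := by
  by_cases h : PySem.Str.isIn (String.ofList [p]) t
  · rw [if_pos h, PySem.Str.toList_replace]
    have h1 : (String.ofList [p]).toList = [p] := String.toList_ofList
    have h2 : (" " : String).toList = [' '] := by decide
    rw [h1, h2, replace_singleton, flatMap_ite_single]
  · have hnot : p ∉ t.toList := by
      intro hmem
      exact h (by
        rw [PySem.Str.isIn_iff_infix]
        simpa [List.singleton_infix_iff] using hmem)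
    rw [if_neg h]
    symm
    calc t.toList.map (fun c => if c = p then ' ' else c)
        = t.toList.map id := by
          apply List.map_congr_left
          intro c hc
          have : c ≠ p := fun he => hnot (he ▸ hc)
          simp [this]
      _ = t.toList := List.map_id _

theorem digit_step (t : String) (d : Char) :
    (if PySem.Str.isIn (String.ofList [d]) t then PySem.Str.replace t (String.ofList [d]) "" else t).toList
      = t.toList.filter (fun c => c ≠ d) := by
  by_cases h : PySem.Str.isIn (String.ofList [d]) t
  · rw [if_pos h, PySem.Str.toList_replace]
    have h1 : (String.ofList [d]).toList = [d] := String.toList_ofList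
    have h2 : ("" : String).toList = [] := by decide
    rw [h1, h2, replace_singleton, flatMap_ite_nil]
  · have hnot : d ∉ t.toList := by
      intro hmem
      exact h (by
        rw [PySem.Str.isIn_iff_infix]
        simpa [List.singleton_infix_iff] using hmem)
    rw [if_neg h]
    symm
    rw [List.filter_eq_self]
    intro c hc
    have : c ≠ d := fun he => hnot (he ▸ hc)
    simpa using this

-- Folding the punctuation replaces = one membership-classifying map (space is never punctuation).
theorem punct_fold (P : List Char) (hsp : ' ' ∉ P) : ∀ (t : String),
    (P.foldl (fun t punc =>
        if PySem.Str.isIn (String.ofList [punc]) t then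
          PySem.Str.replace t (String.ofList [punc]) " " else t) t).toList
      = t.toList.map (fun c => if c ∈ P then ' ' else c) := by
  induction P with
  | nil => intro t; simp
  | cons p P ih =>
      intro t
      have hsp' : ' ' ∉ P := fun h => hsp (List.mem_cons_of_mem _ h)
      rw [List.foldl_cons, ih hsp', punct_step t p, List.map_map]
      apply List.map_congr_left
      intro c _
      by_cases hc : c = p
      · subst hc; simp [hsp', Function.comp]
      · by_cases hm : c ∈ P <;> simp [hc, hm, Function.comp]

-- Folding the digit deletions = one filter.
theorem digit_fold (D : List Char) : ∀ (t : String),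
    (D.foldl (fun t digit =>
        if PySem.Str.isIn (String.ofList [digit]) t then
          PySem.Str.replace t (String.ofList [digit]) "" else t) t).toList
      = t.toList.filter (fun c => c ∉ D) := by
  induction D with
  | nil => intro t; simp
  | cons d D ih =>
      intro t
      rw [List.foldl_cons, ih, digit_step t d, List.filter_filter]
      apply List.filter_congr
      intro c _
      by_cases hd : c = d
      · simp [hd]
      · by_cases hm : c ∈ D <;> simp [hd, hm]

-- character equality reduces to equality of codes
theorem char_eq_iff_toNat (c d : Char) : c = d ↔ c.toNat = d.toNat := by
  constructor
  · intro h; rw [h]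
  · intro h
    apply Char.ext
    apply UInt32.toNat_inj.mp
    exact h

-- membership in A's punctuation table ↔ B's arithmetic range condition
theorem mem_punct_iff (c : Char) :
    c ∈ pyPunctuation ↔ (33 ≤ c.toNat ∧ c.toNat ≤ 126 ∧ ¬(48 ≤ c.toNat ∧ c.toNat ≤ 57)
      ∧ ¬(65 ≤ c.toNat ∧ c.toNat ≤ 90) ∧ ¬(97 ≤ c.toNat ∧ c.toNat ≤ 122)) := by
  simp only [pyPunctuation, List.mem_cons, List.not_mem_nil, or_false, char_eq_iff_toNat, Char.reduceToNat]
  omega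

-- membership in A's digit table ↔ B's digit range
theorem mem_digits_iff (c : Char) :
    c ∈ pyStrDigits ↔ (48 ≤ c.toNat ∧ c.toNat ≤ 57) := by
  simp only [pyStrDigits, List.mem_cons, List.not_mem_nil, or_false, char_eq_iff_toNat, Char.reduceToNat]
  omega

-- per-char agreement of A's map-then-filter with B's classifier
theorem classify_eq (c : Char) :
    List.filter (fun x => x ∉ pyStrDigits) [if c ∈ pyPunctuation then ' ' else c]
      = classifyB c := by
  unfold classifyB
  by_cases hp : c ∈ pyPunctuation
  · have hp' := (mem_punct_iff c).mp hp
    rw [if_pos hp]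
    have hsp : (' ' : Char) ∉ pyStrDigits := by decide
    rw [if_neg (by omega), if_pos (by omega)]
    simp [hsp]
  · have hp' : ¬ _ := fun h => hp ((mem_punct_iff c).mpr h)
    rw [if_neg hp]
    by_cases hd : c ∈ pyStrDigits
    · have hd' := (mem_digits_iff c).mp hd
      rw [if_pos (by omega)]
      simp [hd]
    · have hd' : ¬ _ := fun h => hd ((mem_digits_iff c).mpr h)
      rw [if_neg hd', if_neg (by omega)]
      simp [hd]

-- string-level agreement of the two pipelines
theorem clean_list_eq (l : List Char) :
    (l.map (fun c => if c ∈ pyPunctuation then ' ' else c)).filter (fun c => c ∉ pyStrDigits)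
      = cleanCharsB l := by
  induction l with
  | nil => simp [cleanCharsB]
  | cons c cs ih =>
      rw [List.map_cons, show (if c ∈ pyPunctuation then ' ' else c) :: List.map _ cs
            = [if c ∈ pyPunctuation then ' ' else c] ++ List.map (fun c => if c ∈ pyPunctuation then ' ' else c) cs from rfl,
          List.filter_append, ih, classify_eq]
      rfl

theorem pyCleanA_eq (s : String) :
    pyCleanA s = String.ofList (cleanCharsB s.toList) := by
  apply String.toList_inj.mp
  rw [String.toList_ofList, ← clean_list_eq]
  unfold pyCleanA
  rw [digit_fold, punct_fold pyPunctuation (by decide)]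

theorem alt_eq_map (l : List String) :
    remove_numbers_and_punctuation_from_text_alt l
      = l.map (fun s => String.ofList (cleanCharsB s.toList)) := by
  induction l with
  | nil => rfl
  | cons s rest ih => simp [remove_numbers_and_punctuation_from_text_alt, ih]

-- ===== VERDICT (by name: the statement is the Claim_ definition above) =====
theorem remove_numbers_and_punctuation_from_text_spec : Claim_equal_remove_numbers_and_punctuation_from_text := by
  intro text_data _
  unfold Spec_remove_numbers_and_punctuation_from_text
  unfold remove_numbers_and_punctuation_from_text
  rw [alt_eq_map]
  rw [PySem.List.foldl_pyRange_pyGetD text_data "" (fun acc v => acc ++ [pyCleanA v]) [] le_rfl]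
  rw [Int.toNat_zero, List.drop_zero, PySem.List.foldl_append_singleton_eq_map]
  rw [List.nil_append]
  apply List.map_congr_left
  intro s _
  exact pyCleanA_eq s
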